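-- pv_equiv track=rewrite | github.com/Terryzhang-jp/curise_agent | v2-backend/services/templates/zone_config_builder.py | _normalize_formula_pattern
-- ===== SOURCE A (Python) =====
-- def _normalize_formula_pattern(ai_pattern: str) -> str:
--     """Convert AI formula pattern like '=H*J' to engine format '=H{row}*J{row}'.
--
--     Also handles patterns already in correct format.
--     """
--     if "{row}" in ai_pattern:
--         return ai_pattern  # Already in correct format
--
--     # AI gives "=H*J" — insert {row} after each column letter
--     result = ""
--     i = 0
--     s = ai_pattern
--     while i < len(s):
--         if s[i].isalpha() and s[i].isupper():
--             # Collect full column letters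
--             col = ""
--             while i < len(s) and s[i].isalpha() and s[i].isupper():
--                 col += s[i]
--                 i += 1
--             # Skip if followed by digits (already has row number)
--             if i < len(s) and s[i].isdigit():
--                 result += col
--             else:
--                 result += col + "{row}"
--         else:
--             result += s[i]
--             i += 1
--
--     return result
-- ===== SOURCE B (Python) =====
-- from itertools import groupby
--
--
-- def _normalize_formula_pattern(ai_pattern: str) -> str:
--     """Insert {row} after each run of uppercase column letters (group-based)."""
--     if "{row}" in ai_pattern:
--         return ai_pattern
--
--     key = lambda c: c.isalpha() and c.isupper()
--     groups = [''.join(g) for _, g in groupby(ai_pattern, key=key)]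
--     parts = []
--     for j, chunk in enumerate(groups):
--         parts.append(chunk)
--         if key(chunk[0]):
--             nxt = groups[j + 1][0] if j + 1 < len(groups) else ''
--             if not nxt.isdigit():
--                 parts.append('{row}')
--     return ''.join(parts)
-- ===== Notes on version B (the rewrite author's own statement) =====
-- stated objective: faster
-- what changed: Replaced the index-based while loop with inner collection loop and repeated string concatenation by an itertools.groupby split into uppercase/non-uppercase runs, walked once with one-group lookahead and joined at the end.
import Mathlib
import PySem

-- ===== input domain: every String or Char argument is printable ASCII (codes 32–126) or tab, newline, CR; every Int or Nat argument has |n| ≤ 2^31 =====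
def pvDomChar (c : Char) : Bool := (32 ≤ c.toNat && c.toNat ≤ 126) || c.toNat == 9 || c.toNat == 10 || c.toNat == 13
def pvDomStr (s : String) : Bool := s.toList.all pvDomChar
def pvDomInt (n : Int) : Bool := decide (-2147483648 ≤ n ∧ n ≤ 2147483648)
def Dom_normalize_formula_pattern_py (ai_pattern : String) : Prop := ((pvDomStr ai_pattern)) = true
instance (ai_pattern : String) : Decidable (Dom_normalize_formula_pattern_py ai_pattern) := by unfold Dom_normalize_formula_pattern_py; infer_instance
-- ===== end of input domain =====

-- B replaces A's index-based while loop (with an inner collection loop) by a groupby-style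
-- split into uppercase/non-uppercase runs walked once with one-group lookahead, joined at the end
-- (objective: faster; a timing run measured B faster at the largest sizes).

-- ===== PORT A =====
-- `c.isalpha() and c.isupper()` (used by both sources)
def pvUp (c : Char) : Bool := PySem.Chars.isalpha c && PySem.Chars.isupper c

def pvRow : List Char := "{row}".toList

-- inner `while i < len(s) and s[i].isalpha() and s[i].isupper(): col += s[i]; i += 1`
def pvCollect : List Char → List Char × List Char
  | [] => ([], [])
  | c :: cs => if pvUp c then ((c :: (pvCollect cs).1), (pvCollect cs).2) else ([], c :: cs)

theorem pvCollect_snd_len (l : List Char) : (pvCollect l).2.length ≤ l.length := by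
  induction l with
  | nil => simp [pvCollect]
  | cons c cs ih => simp only [pvCollect]; split <;> simp <;> omega

-- outer `while i < len(s)` loop of A
def pvALoop : List Char → List Char
  | [] => []
  | c :: cs =>
    if pvUp c then
      let col := c :: (pvCollect cs).1
      let rest := (pvCollect cs).2
      (match rest with
       | d :: _ => if PySem.Chars.isdigit d then col else col ++ pvRow
       | [] => col ++ pvRow) ++ pvALoop rest
    else c :: pvALoop cs
termination_by l => l.length
decreasing_by
  · exact Nat.lt_succ_of_le (pvCollect_snd_len cs)
  · simp

def normalize_formula_pattern_py (ai_pattern : String) : String :=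
  if PySem.Str.isIn "{row}" ai_pattern then ai_pattern
  else String.mk (pvALoop ai_pattern.toList)

-- ===== PORT B =====
-- itertools.groupby(s, key = pvUp): maximal runs of equal key, in order
def pvRuns : List Char → List (List Char)
  | [] => []
  | c :: cs =>
    (c :: cs.takeWhile (fun d => pvUp d == pvUp c)) :: pvRuns (cs.dropWhile (fun d => pvUp d == pvUp c))
termination_by l => l.length
decreasing_by exact Nat.lt_succ_of_le (List.length_dropWhile_le _ _)

-- the for-loop over groups with one-group lookahead (`nxt = groups[j+1][0] if … else ''`)
def pvEmit : List (List Char) → List Char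
  | [] => []
  | [] :: gs => pvEmit gs
  | (c :: g) :: gs =>
    let nxt : List Char := match gs with | (d :: _) :: _ => [d] | _ => []
    (c :: g) ++ (if pvUp c then (if PySem.Chars.strIsdigit nxt then [] else pvRow) else []) ++ pvEmit gs

def normalize_formula_pattern_py_alt (ai_pattern : String) : String :=
  if PySem.Str.isIn "{row}" ai_pattern then ai_pattern
  else String.mk (pvEmit (pvRuns ai_pattern.toList))

-- ===== PRECONDITION & SPEC =====
def Spec_normalize_formula_pattern_py (ai_pattern : String) (out : String) : Prop := out = normalize_formula_pattern_py_alt ai_pattern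
instance (ai_pattern : String) (out : String) : Decidable (Spec_normalize_formula_pattern_py ai_pattern out) := by unfold Spec_normalize_formula_pattern_py; infer_instance

-- ===== CLAIM (what is proved, stated in full; the proofs are below) =====
def Claim_equal_normalize_formula_pattern_py : Prop := ∀ (ai_pattern : String), Dom_normalize_formula_pattern_py ai_pattern → Spec_normalize_formula_pattern_py ai_pattern (normalize_formula_pattern_py ai_pattern)

-- ===== LEMMAS AND PROOFS =====
theorem pvCollect_eq (l : List Char) : pvCollect l = (l.takeWhile pvUp, l.dropWhile pvUp) := by
  induction l with
  | nil => simp [pvCollect]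
  | cons c cs ih =>
    by_cases h : pvUp c = true
    · simp [pvCollect, h, ih]
    · have h' : pvUp c = false := by simpa using h
      simp [pvCollect, h', List.takeWhile_cons, List.dropWhile_cons]

theorem pvALoop_nonup (t rest : List Char) (h : ∀ d ∈ t, pvUp d = false) :
    pvALoop (t ++ rest) = t ++ pvALoop rest := by
  induction t with
  | nil => simp
  | cons x xs ih =>
    have hx : pvUp x = false := h x (by simp)
    simp only [List.cons_append, pvALoop, hx]
    simp [ih (fun d hd => h d (by simp [hd]))]

theorem pv_main : ∀ (n : Nat) (l : List Char), l.length ≤ n → pvALoop l = pvEmit (pvRuns l) := by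
  intro n
  induction n with
  | zero => intro l hl; simp at hl; simp [hl, pvALoop, pvRuns, pvEmit]
  | succ n ih =>
    intro l hl
    match l with
    | [] => simp [pvALoop, pvRuns, pvEmit]
    | c :: cs =>
      by_cases h : pvUp c = true
      · -- uppercase run
        have hb : (fun d => pvUp d == pvUp c) = pvUp := by funext d; simp [h]
        simp only [pvRuns, hb]
        set t := cs.takeWhile pvUp with ht
        set rest := cs.dropWhile pvUp with hrest
        have hlen : rest.length ≤ n := by
          have h2 := List.length_dropWhile_le pvUp cs
          rw [← hrest] at h2
          simp at hl; omega
        have hIH := ih rest hlen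
        have hnxt : (match pvRuns rest with | (d :: _) :: _ => [d] | _ => ([] : List Char))
                  = (match rest with | d :: _ => [d] | [] => ([] : List Char)) := by
          match rest with
          | [] => simp [pvRuns]
          | d :: rs => simp [pvRuns]
        simp only [pvALoop, h, if_true, pvCollect_eq, ← ht, ← hrest, pvEmit, hnxt, hIH]
        match rest with
        | [] => simp [PySem.Chars.strIsdigit, pvRuns, pvEmit]
        | d :: rs =>
          have hdig : PySem.Chars.strIsdigit [d] = PySem.Chars.isdigit d := by
            simp [PySem.Chars.strIsdigit]
          by_cases hd : PySem.Chars.isdigit d = true <;> simp [hd, hdig]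
      · -- non-uppercase run
        have h' : pvUp c = false := by simpa using h
        have hb : (fun d => pvUp d == pvUp c) = (fun d => !pvUp d) := by funext d; simp [h']
        simp only [pvRuns, hb]
        set t := cs.takeWhile (fun d => !pvUp d) with ht
        set rest := cs.dropWhile (fun d => !pvUp d) with hrest
        have hcs : cs = t ++ rest := (List.takeWhile_append_dropWhile).symm
        have htf : ∀ d ∈ (c :: t), pvUp d = false := by
          intro d hd
          rcases List.mem_cons.mp hd with rfl | hd
          · exact h'
          · have := List.mem_takeWhile_imp hd
            simpa using this
        have hlen : rest.length ≤ n := by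
          have h2 := List.length_dropWhile_le (fun d => !pvUp d) cs
          rw [← hrest] at h2
          simp at hl; omega
        have hIH := ih rest hlen
        have hA : pvALoop (c :: cs) = (c :: t) ++ pvALoop rest := by
          rw [show (c :: cs) = (c :: t) ++ rest by simp [hcs]]
          exact pvALoop_nonup _ _ htf
        simp [pvEmit, hA, h', hIH]

-- ===== VERDICT (by name: the statement is the Claim_ definition above) =====
theorem normalize_formula_pattern_py_spec : Claim_equal_normalize_formula_pattern_py := by
  intro s _
  unfold Spec_normalize_formula_pattern_py normalize_formula_pattern_py normalize_formula_pattern_py_alt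
  split
  · rfl
  · exact congrArg String.mk (pv_main s.toList.length s.toList le_rfl)
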